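-- pv_equiv track=rewrite | github.com/jbmiller10/semantik | packages/shared/chunking/unified/hybrid_strategy.py | _has_structure
-- ===== SOURCE A (Python) =====
-- def _has_structure(content: str) -> bool:
--     """Check if content has structural elements."""
--     # Look for lists, tables, etc.
--     indicators = [
--         "\n- ",  # Unordered list
--         "\n* ",  # Alternative unordered list
--         "\n1. ",  # Ordered list
--         "\n| ",  # Table
--         "\n> ",  # Blockquote
--     ]
--
--     return any(indicator in content for indicator in indicators)
-- ===== SOURCE B (Python) =====
-- def _has_structure(content: str) -> bool:
--     """Check if content has structural elements."""
--     # Single scan: a structural marker is a line start (position right after a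
--     # newline) carrying one of these prefixes.
--     prefixes = ("- ", "* ", "1. ", "| ", "> ")
--     return any(ch == "\n" and content.startswith(prefixes, i + 1)
--                for i, ch in enumerate(content))
-- ===== Notes on version B (the rewrite author's own statement) =====
-- stated objective: alternative
-- what changed: A runs five independent substring searches ('\n- ' in content, ...); B makes one scan over the characters and, at each newline, tests whether one of the five line prefixes follows (startswith with a tuple at position i+1).
import Mathlib
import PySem

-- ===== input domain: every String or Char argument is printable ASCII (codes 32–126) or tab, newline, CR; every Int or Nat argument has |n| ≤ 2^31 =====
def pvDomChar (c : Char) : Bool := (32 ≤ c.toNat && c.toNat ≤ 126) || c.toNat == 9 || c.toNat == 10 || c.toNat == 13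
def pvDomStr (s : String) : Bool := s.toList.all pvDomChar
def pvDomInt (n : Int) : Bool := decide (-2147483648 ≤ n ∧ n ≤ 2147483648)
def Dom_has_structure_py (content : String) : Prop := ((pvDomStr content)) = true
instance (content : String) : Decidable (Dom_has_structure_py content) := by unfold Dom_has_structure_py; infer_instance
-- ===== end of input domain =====

-- B replaces A's five independent substring searches by one scan over the
-- characters that tests the five line prefixes after each newline (alternative
-- decomposition, same behaviour).

-- ===== PORT A =====
def has_structure_py (content : String) : Bool :=
  let indicators : List String := ["\n- ", "\n* ", "\n1. ", "\n| ", "\n> "]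
  indicators.any (fun indicator => PySem.Str.isIn indicator content)

-- ===== PORT B =====
def hsPrefixes : List (List Char) := [['-', ' '], ['*', ' '], ['1', '.', ' '], ['|', ' '], ['>', ' ']]

-- the generator inside any(...): at each index i with content[i] = '\n',
-- content.startswith(prefixes, i + 1)
def hsScan : List Char → Bool
  | [] => false
  | c :: rest => (c == '\n' && hsPrefixes.any (fun p => p.isPrefixOf rest)) || hsScan rest

def has_structure_py_alt (content : String) : Bool :=
  hsScan content.toList

-- ===== PRECONDITION & SPEC =====
def Spec_has_structure_py (content : String) (out : Bool) : Prop := out = has_structure_py_alt content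
instance (content : String) (out : Bool) : Decidable (Spec_has_structure_py content out) := by unfold Spec_has_structure_py; infer_instance

-- ===== CLAIM (what is proved, stated in full; the proofs are below) =====
def Claim_equal_has_structure_py : Prop := ∀ (content : String), Dom_has_structure_py content → Spec_has_structure_py content (has_structure_py content)

-- ===== LEMMAS AND PROOFS =====

theorem hsScan_iff (cs : List Char) :
    hsScan cs = true ↔ ∃ p ∈ hsPrefixes, ('\n' :: p) <:+: cs := by
  induction cs with
  | nil =>
    simp [hsScan]
  | cons c rest ih =>
    simp only [hsScan, Bool.or_eq_true, Bool.and_eq_true, beq_iff_eq, List.any_eq_true, ih]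
    constructor
    · rintro (⟨rfl, p, hp, hpre⟩ | ⟨p, hp, hinf⟩)
      · exact ⟨p, hp, List.infix_cons_iff.mpr (Or.inl
          (List.cons_prefix_cons.mpr ⟨rfl, List.isPrefixOf_iff_prefix.mp hpre⟩))⟩
      · exact ⟨p, hp, hinf.trans (List.suffix_cons c rest).isInfix⟩
    · rintro ⟨p, hp, hinf⟩
      rcases List.infix_cons_iff.mp hinf with hpre | hinf'
      · rcases List.cons_prefix_cons.mp hpre with ⟨rfl, hp'⟩
        exact Or.inl ⟨rfl, p, hp, List.isPrefixOf_iff_prefix.mpr hp'⟩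
      · exact Or.inr ⟨p, hp, hinf'⟩

theorem hsA_iff (content : String) :
    has_structure_py content = true ↔ ∃ p ∈ hsPrefixes, ('\n' :: p) <:+: content.toList := by
  simp only [has_structure_py, List.any_eq_true, List.mem_cons, List.not_mem_nil, or_false,
    PySem.Str.isIn_eq, PySem.Chars.isIn_iff_infix, hsPrefixes]
  constructor
  · rintro ⟨ind, h, hinf⟩
    rcases h with rfl | rfl | rfl | rfl | rfl
    · exact ⟨['-', ' '], by simp, hinf⟩
    · exact ⟨['*', ' '], by simp, hinf⟩
    · exact ⟨['1', '.', ' '], by simp, hinf⟩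
    · exact ⟨['|', ' '], by simp, hinf⟩
    · exact ⟨['>', ' '], by simp, hinf⟩
  · rintro ⟨p, hp, hinf⟩
    rcases hp with rfl | rfl | rfl | rfl | rfl
    · exact ⟨"\n- ", by simp, hinf⟩
    · exact ⟨"\n* ", by simp, hinf⟩
    · exact ⟨"\n1. ", by simp, hinf⟩
    · exact ⟨"\n| ", by simp, hinf⟩
    · exact ⟨"\n> ", by simp, hinf⟩

-- ===== VERDICT (by name: the statement is the Claim_ definition above) =====
theorem has_structure_py_spec : Claim_equal_has_structure_py := by
  intro content _
  unfold Spec_has_structure_py has_structure_py_alt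
  rw [Bool.eq_iff_iff, hsA_iff, hsScan_iff]
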